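-- pv_equiv track=rewrite | github.com/erinchocolate/context-infrastructure-en | 03 refined/tools/rst_to_markdown.py | _parse_simple_col_positions
-- ===== SOURCE A (Python) =====
-- def _parse_simple_col_positions(sep_line: str) -> list:
--     """Extract (start, end) column ranges from a simple table separator line."""
--     cols = []
--     in_col = False
--     start = None
--     for j, c in enumerate(sep_line.rstrip() + ' '):
--         if c == '=' and not in_col:
--             start = j
--             in_col = True
--         elif c != '=' and in_col:
--             cols.append((start, j))
--             in_col = False
--     return cols
-- ===== SOURCE B (Python) =====
-- def _parse_simple_col_positions(sep_line: str) -> list: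
--     """Extract (start, end) column ranges from a simple table separator line."""
--     s = sep_line.rstrip()
--     cols = []
--     i = 0
--     n = len(s)
--     while i < n:
--         if s[i] == '=':
--             j = i + 1
--             while j < n and s[j] == '=':
--                 j += 1
--             cols.append((i, j))
--             i = j
--         else:
--             i += 1
--     return cols
-- ===== Notes on version B (the rewrite author's own statement) =====
-- stated objective: alternative
-- what changed: Replaces A's character-by-character state machine (in_col flag, start variable, appended-space sentinel to flush the last run) with a run-jumping two-pointer scan of the stripped line that finds each maximal run of equals signs and emits its half-open span directly.
import Mathlib
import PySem

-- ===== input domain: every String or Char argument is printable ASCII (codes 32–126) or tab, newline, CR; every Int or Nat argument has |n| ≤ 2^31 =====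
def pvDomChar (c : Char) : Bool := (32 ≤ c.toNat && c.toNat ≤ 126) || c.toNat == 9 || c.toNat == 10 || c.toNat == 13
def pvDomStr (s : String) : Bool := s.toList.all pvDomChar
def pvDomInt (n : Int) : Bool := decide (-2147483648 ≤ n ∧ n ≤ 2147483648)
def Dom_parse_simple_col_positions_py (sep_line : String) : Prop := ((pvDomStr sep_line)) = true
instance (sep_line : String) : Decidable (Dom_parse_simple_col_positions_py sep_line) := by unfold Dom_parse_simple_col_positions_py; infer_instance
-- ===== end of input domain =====

-- B replaces A's in_col/start state machine over a sentinel-padded line by a run-jumping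
-- two-pointer scan of the stripped line (objective: alternative; same O(n) cost).

-- ===== PORT A =====
-- the for-loop of A: state (cols, in_col, start), one character (with its index j) at a time
def pvLoopA (cs : List Char) (j : Int) (cols : List (Int × Int)) (in_col : Bool) (start : Int) :
    List (Int × Int) :=
  match cs with
  | [] => cols
  | c :: rest =>
    if c = '=' && !in_col then pvLoopA rest (j + 1) cols true j
    else if c ≠ '=' && in_col then pvLoopA rest (j + 1) (cols ++ [(start, j)]) false start
    else pvLoopA rest (j + 1) cols in_col start

def parse_simple_col_positions_py (sep_line : String) : List (Int × Int) :=
  -- start = None is only read after in_col is set; 0 stands for the unread None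
  pvLoopA (PySem.Chars.rstrip sep_line.toList ++ [' ']) 0 [] false 0

-- ===== PORT B =====
-- the outer while loop of Source B: the list is the suffix s[i:], i the current index;
-- the inner while (advancing j over the run) is the takeWhile
def pvSpansB (cs : List Char) (i : Int) : List (Int × Int) :=
  match cs with
  | [] => []
  | c :: rest =>
    if h : c = '=' then
      let n := ((c :: rest).takeWhile (· = '=')).length
      (i, i + n) :: pvSpansB ((c :: rest).drop n) (i + n)
    else pvSpansB rest (i + 1)
termination_by cs.length
decreasing_by
  all_goals simp [h]

def parse_simple_col_positions_py_alt (sep_line : String) : List (Int × Int) :=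
  pvSpansB (PySem.Chars.rstrip sep_line.toList) 0

-- ===== PRECONDITION & SPEC =====
def Spec_parse_simple_col_positions_py (sep_line : String) (out : List (Int × Int)) : Prop := out = parse_simple_col_positions_py_alt sep_line
instance (sep_line : String) (out : List (Int × Int)) : Decidable (Spec_parse_simple_col_positions_py sep_line out) := by unfold Spec_parse_simple_col_positions_py; infer_instance

-- ===== CLAIM (what is proved, stated in full; the proofs are below) =====
def Claim_equal_parse_simple_col_positions_py : Prop := ∀ (sep_line : String), Dom_parse_simple_col_positions_py sep_line → Spec_parse_simple_col_positions_py sep_line (parse_simple_col_positions_py sep_line)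

-- ===== LEMMAS AND PROOFS =====

-- value of A's loop when in the middle of a run that started at s (position j still inside it)
def pvCont (cs : List Char) (j s : Int) : List (Int × Int) :=
  let k := (cs.takeWhile (· = '=')).length
  (s, j + k) :: pvSpansB (cs.drop k) (j + k)

lemma pvLoop_main (cs : List Char) :
    (∀ j cols s, pvLoopA (cs ++ [' ']) j cols false s = cols ++ pvSpansB cs j) ∧
    (∀ j cols s, pvLoopA (cs ++ [' ']) j cols true s = cols ++ pvCont cs j s) := by
  induction cs with
  | nil =>
    constructor <;> intro j cols s <;>
      simp [pvLoopA, pvSpansB, pvCont]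
  | cons c rest ih =>
    constructor <;> intro j cols s
    · by_cases hc : c = '='
      · -- enter a run at j
        simp only [List.cons_append, pvLoopA, hc, decide_true, Bool.not_false,
          Bool.and_self, if_true]
        rw [ih.2 (j + 1) cols j]
        simp only [pvCont, pvSpansB, List.takeWhile_cons, decide_true, dif_pos,
          List.append_cancel_left_eq]
        push_cast [List.length_cons, List.drop_succ_cons]
        ring_nf
      · -- skip a non-'=' char
        simp only [List.cons_append, pvLoopA]
        rw [if_neg (by simp [hc]), if_neg (by simp), ih.1 (j + 1) cols s]
        simp [pvSpansB, hc]
    · by_cases hc : c = '='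
      · -- continue the run
        simp only [List.cons_append, pvLoopA]
        rw [if_neg (by simp [hc]), if_neg (by simp [hc]), ih.2 (j + 1) cols s]
        simp only [pvCont, List.takeWhile_cons, hc, decide_true,
          List.append_cancel_left_eq]
        push_cast [List.length_cons, List.drop_succ_cons]
        ring_nf
      · -- run ends here: flush (s, j)
        simp only [List.cons_append, pvLoopA]
        rw [if_neg (by simp [hc]), if_pos (by simp [hc]), ih.1 (j + 1) (cols ++ [(s, j)]) s]
        simp [pvCont, pvSpansB, hc]

-- ===== VERDICT (by name: the statement is the Claim_ definition above) =====
theorem parse_simple_col_positions_py_spec : Claim_equal_parse_simple_col_positions_py := by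
  intro sep_line _
  unfold Spec_parse_simple_col_positions_py parse_simple_col_positions_py
    parse_simple_col_positions_py_alt
  rw [(pvLoop_main (PySem.Chars.rstrip sep_line.toList)).1 0 [] 0]
  simp
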